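-- pv_equiv track=rewrite | github.com/Yuuko-kurisu/IEEE_TII_PCCA_Github | BCSA_01_Hypothesis_Generator.py | _find_matching_column_enhanced
-- ===== SOURCE A (Python) =====
-- from typing import Dict, List, Tuple, Any, Optional, Protocol, Union
--
-- def _find_matching_column_enhanced(node_id: str, id_to_text: Dict, columns: List[str]) -> Optional[str]:
--     """增强的列匹配逻辑 - 保持向后兼容"""
--     node_text = id_to_text.get(node_id, "")
--     if not node_text:
--         return None
--
--     if node_text in columns:
--         return node_text
--
--     node_text_lower = node_text.lower()
--     for col in columns:
--         if col.startswith('sensor_') and '_' in col: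
--             parts = col.split('_', 2)
--             if len(parts) >= 3:
--                 clean_col_name = parts[2].lower()
--                 if clean_col_name == node_text_lower:
--                     return col
--
--     for col in columns:
--         col_lower = col.lower()
--         if (node_text_lower in col_lower or col_lower in node_text_lower):
--             return col
--
--     return None
-- ===== SOURCE B (Python) =====
-- def _find_matching_column_enhanced(node_id, id_to_text, columns):
--     """Single pass over columns: return on exact match, else remember the first
--     sensor-style match and the first substring match and pick by priority."""
--     node_text = id_to_text.get(node_id, "")
--     if not node_text:
--         return None
--     node_text_lower = node_text.lower()
--     first_sensor = None
--     first_substring = None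
--     for col in columns:
--         if col == node_text:
--             return node_text
--         parts = col.split('_', 2)
--         if col.startswith('sensor_') and len(parts) >= 3 and parts[2].lower() == node_text_lower:
--             if first_sensor is None:
--                 first_sensor = col
--         elif first_substring is None:
--             col_lower = col.lower()
--             if node_text_lower in col_lower or col_lower in node_text_lower:
--                 first_substring = col
--     return first_sensor if first_sensor is not None else first_substring
-- ===== Notes on version B (the rewrite author's own statement) =====
-- stated objective: alternative
-- what changed: Replaced A's three separate scans of columns (membership test, sensor loop, substring loop) by one single pass that returns on an exact match and otherwise remembers the first sensor and first substring candidates, picking by priority at the end.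
import Mathlib
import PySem

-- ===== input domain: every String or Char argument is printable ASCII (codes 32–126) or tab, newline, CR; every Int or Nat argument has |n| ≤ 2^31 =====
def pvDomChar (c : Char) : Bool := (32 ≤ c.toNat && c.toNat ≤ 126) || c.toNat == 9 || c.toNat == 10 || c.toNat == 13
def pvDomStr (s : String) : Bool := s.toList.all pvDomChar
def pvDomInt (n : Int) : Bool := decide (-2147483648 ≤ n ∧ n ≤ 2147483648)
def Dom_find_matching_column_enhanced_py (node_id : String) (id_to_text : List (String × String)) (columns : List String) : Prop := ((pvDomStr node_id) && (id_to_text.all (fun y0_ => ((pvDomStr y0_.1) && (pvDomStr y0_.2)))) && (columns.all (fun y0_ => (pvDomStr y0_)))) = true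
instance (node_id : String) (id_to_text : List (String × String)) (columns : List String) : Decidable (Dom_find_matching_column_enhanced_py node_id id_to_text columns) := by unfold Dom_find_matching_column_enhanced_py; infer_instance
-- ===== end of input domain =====

-- B replaces A's three separate scans of `columns` by one single pass keeping two candidates (alternative decomposition, same cost).

-- ===== PORT A =====
-- A's first loop body: col.startswith('sensor_') and '_' in col and len(col.split('_',2)) >= 3 and parts[2].lower() == node_text_lower
def pvSensorPredA (node_text_lower : String) (col : String) : Bool :=
  PySem.Str.startswith col "sensor_" && PySem.Str.isIn "_" col &&
    (match PySem.Str.splitMax? col "_" 2 with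
     | some parts =>
         decide (3 ≤ parts.length) && (PySem.Str.lower (parts.getD 2 "") == node_text_lower)
     | none => false)

-- A's second loop body: node_text_lower in col_lower or col_lower in node_text_lower
def pvSubPred (node_text_lower : String) (col : String) : Bool :=
  PySem.Str.isIn node_text_lower (PySem.Str.lower col) || PySem.Str.isIn (PySem.Str.lower col) node_text_lower

def find_matching_column_enhanced_py (node_id : String) (id_to_text : List (String × String)) (columns : List String) : Option String :=
  let node_text := (PySem.Dict.mk id_to_text).getD node_id ""
  if node_text == "" then none
  else if columns.contains node_text then some node_text
  else
    let ntl := PySem.Str.lower node_text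
    match columns.find? (pvSensorPredA ntl) with
    | some col => some col
    | none =>
      match columns.find? (pvSubPred ntl) with
      | some col => some col
      | none => none

-- ===== PORT B =====
-- B's loop body predicate: col.startswith('sensor_') and len(parts) >= 3 and parts[2].lower() == node_text_lower
def pvSensorPredB (node_text_lower : String) (col : String) : Bool :=
  let parts := (PySem.Str.splitMax? col "_" 2).getD []
  PySem.Str.startswith col "sensor_" && decide (3 ≤ parts.length) &&
    (PySem.Str.lower (parts.getD 2 "") == node_text_lower)

-- B's single pass, carrying first_sensor / first_substring
def pvAltGo (node_text ntl : String) (cols : List String) (first_sensor first_substring : Option String) : Option String :=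
  match cols with
  | [] => match first_sensor with
          | some s => some s
          | none => first_substring
  | col :: rest =>
    if col == node_text then some node_text
    else if pvSensorPredB ntl col then
      pvAltGo node_text ntl rest (if first_sensor = none then some col else first_sensor) first_substring
    else if first_substring = none && pvSubPred ntl col then
      pvAltGo node_text ntl rest first_sensor (some col)
    else
      pvAltGo node_text ntl rest first_sensor first_substring

def find_matching_column_enhanced_py_alt (node_id : String) (id_to_text : List (String × String)) (columns : List String) : Option String :=
  let node_text := (PySem.Dict.mk id_to_text).getD node_id ""
  if node_text == "" then none
  else pvAltGo node_text (PySem.Str.lower node_text) columns none none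

-- ===== PRECONDITION & SPEC =====
def Spec_find_matching_column_enhanced_py (node_id : String) (id_to_text : List (String × String)) (columns : List String) (out : Option String) : Prop := out = find_matching_column_enhanced_py_alt node_id id_to_text columns
instance (node_id : String) (id_to_text : List (String × String)) (columns : List String) (out : Option String) : Decidable (Spec_find_matching_column_enhanced_py node_id id_to_text columns out) := by unfold Spec_find_matching_column_enhanced_py; infer_instance

-- ===== CLAIM (what is proved, stated in full; the proofs are below) =====
def Claim_equal_find_matching_column_enhanced_py : Prop := ∀ (node_id : String) (id_to_text : List (String × String)) (columns : List String), Dom_find_matching_column_enhanced_py node_id id_to_text columns → Spec_find_matching_column_enhanced_py node_id id_to_text columns (find_matching_column_enhanced_py node_id id_to_text columns)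

-- ===== LEMMAS AND PROOFS =====

-- startswith 'sensor_' implies '_' in col, so A's extra conjunct is redundant
lemma pvSensorPred_eq (ntl col : String) : pvSensorPredA ntl col = pvSensorPredB ntl col := by
  unfold pvSensorPredA pvSensorPredB
  by_cases h : PySem.Str.startswith col "sensor_" = true
  · have hin : PySem.Chars.isIn ['_'] col.toList = true := by
      rw [PySem.Chars.isIn_iff_infix]
      have hp : "sensor_".toList <+: col.toList :=
        (PySem.Chars.startswith_iff _ _).1 (by simpa [PySem.Str.startswith] using h)
      exact List.IsInfix.trans (by decide) hp.isInfix
    cases hps : PySem.Str.splitMax? col "_" 2 with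
    | none => simp
    | some parts =>
      simp [hin, Bool.and_assoc]
      rfl
  · simp [Bool.not_eq_true] at h
    simp [h]

lemma pvAltGo_spec (node_text ntl : String) (cols : List String) (fs fsub : Option String) :
    pvAltGo node_text ntl cols fs fsub =
      if cols.contains node_text then some node_text
      else match fs.or (cols.find? (pvSensorPredB ntl)) with
           | some s => some s
           | none => fsub.or (cols.find? (pvSubPred ntl)) := by
  induction cols generalizing fs fsub with
  | nil => cases fs <;> cases fsub <;> simp [pvAltGo]
  | cons col rest ih =>
    by_cases hx : col == node_text
    · have hxe : col = node_text := by simpa using hx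
      subst hxe
      simp [pvAltGo]
    · have hxe : ¬ node_text = col := fun e => hx (by simp [e])
      by_cases hs : pvSensorPredB ntl col = true
      · rw [pvAltGo, if_neg (by simp_all), if_pos hs, ih]
        simp [hs, hxe]
        cases fs <;> simp [Option.or]
      · by_cases hb : (fsub = none && pvSubPred ntl col) = true
        · simp only [Bool.and_eq_true, decide_eq_true_eq] at hb
          rw [pvAltGo, if_neg (by simp_all), if_neg (by simp [hs]), if_pos (by simp [hb.1, hb.2]), ih]
          simp [hs, hb.1, hb.2, Option.or, hxe]
        · simp only [Bool.and_eq_true, not_and_or, decide_eq_true_eq] at hb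
          rw [pvAltGo, if_neg (by simp_all), if_neg (by simp [hs]),
              if_neg (by simp only [Bool.and_eq_true, decide_eq_true_eq, not_and_or]; tauto), ih]
          have hsub : fsub.or ((col :: rest).find? (pvSubPred ntl)) = fsub.or (rest.find? (pvSubPred ntl)) := by
            rcases hb with h | h
            · cases fsub with
              | none => exact absurd rfl h
              | some v => simp [Option.or]
            · have h' : pvSubPred ntl col = false := by simpa using h
              simp [h']
          simp only [List.find?_cons, hs] at hsub ⊢
          simp [hxe, hsub]

-- ===== VERDICT (by name: the statement is the Claim_ definition above) =====
theorem find_matching_column_enhanced_py_spec : Claim_equal_find_matching_column_enhanced_py := by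
  intro node_id id_to_text columns _
  unfold Spec_find_matching_column_enhanced_py find_matching_column_enhanced_py find_matching_column_enhanced_py_alt
  generalize (PySem.Dict.mk id_to_text).getD node_id "" = nt
  by_cases h0 : nt == ""
  · simp [h0]
  · have h0' : (nt == "") = false := by simpa using h0
    simp only [h0', Bool.false_eq_true, if_false]
    rw [pvAltGo_spec]
    have hpred : columns.find? (pvSensorPredA (PySem.Str.lower nt)) = columns.find? (pvSensorPredB (PySem.Str.lower nt)) := by
      rw [funext (fun c => pvSensorPred_eq (PySem.Str.lower nt) c)]
    by_cases hc : columns.contains nt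
    · have hc' : nt ∈ columns := by simpa using hc
      simp [hc']
    · simp only [hc, Bool.false_eq_true, if_false, Option.none_or, hpred]
      cases columns.find? (pvSensorPredB (PySem.Str.lower nt)) with
      | some s => simp
      | none => cases columns.find? (pvSubPred (PySem.Str.lower nt)) <;> simp
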